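-- pv_equiv track=rewrite | github.com/Fedefirewall/Algorithms-for-truck-and-drone-delivery | Genetic Algorithm/copy Genetic Algorithm.py | solution_duplicated
-- ===== SOURCE A (Python) =====
-- def contains(small, big):
--     for i in range(len(big)-len(small)+1):
--         for j in range(len(small)):
--             if big[i+j] != small[j]:
--                 break
--         else:
--             return True
--     return False
--
-- def solution_duplicated(population,solution_input):
--
--     #scorro tutte le soliuzoni
--     for solution in population:
--
--         flag=0
--         #scorro tutti i percorsi e li duplico(truck, drone1,drone2)
--         for path in solution:
--
--             path=path*2
--             #scorro tutti i percorsi in questa soluzione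
--             for path_input in solution_input:
--                 #controllo se é una sotto lista
--                 if(contains(path_input,path) and len(path_input)==(len(path)/2) ):
--                     flag+=1
--                     # se é sottolista posso smettere di ciclare e cambiare path2
--                     break
--             #se dato path, nessun path_input ha fatto flag su questo path, allora sicuramente questa soluzione é diversa
--             else:
--                 break
--         #se flag=15 allora ogni path é in path2, quindi la soluzione é uguale
--         if flag==len(solution):
--             return True
--     #se sono qua ogni soluzione aveva almeno un path che nopn era contentenuto in nessun path2, flag<15
--     return False
-- ===== SOURCE B (Python) =====
-- def _canon(p):
--     # lexicographically minimal rotation: canonical representative of p's rotation class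
--     if not p:
--         return ()
--     return min(tuple(p[i:] + p[:i]) for i in range(len(p)))
--
-- def solution_duplicated(population, solution_input):
--     targets = {_canon(p) for p in solution_input}
--     return any(all(_canon(path) in targets for path in solution)
--                for solution in population)
-- ===== Notes on version B (the rewrite author's own statement) =====
-- stated objective: alternative
-- what changed: Instead of testing every (path, path_input) pair by a nested-loop substring search on the doubled path, B computes a canonical (lexicographically minimal) rotation per path and replaces the whole inner solution_input scan by one lookup in a set of canonical forms built once.
import Mathlib
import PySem

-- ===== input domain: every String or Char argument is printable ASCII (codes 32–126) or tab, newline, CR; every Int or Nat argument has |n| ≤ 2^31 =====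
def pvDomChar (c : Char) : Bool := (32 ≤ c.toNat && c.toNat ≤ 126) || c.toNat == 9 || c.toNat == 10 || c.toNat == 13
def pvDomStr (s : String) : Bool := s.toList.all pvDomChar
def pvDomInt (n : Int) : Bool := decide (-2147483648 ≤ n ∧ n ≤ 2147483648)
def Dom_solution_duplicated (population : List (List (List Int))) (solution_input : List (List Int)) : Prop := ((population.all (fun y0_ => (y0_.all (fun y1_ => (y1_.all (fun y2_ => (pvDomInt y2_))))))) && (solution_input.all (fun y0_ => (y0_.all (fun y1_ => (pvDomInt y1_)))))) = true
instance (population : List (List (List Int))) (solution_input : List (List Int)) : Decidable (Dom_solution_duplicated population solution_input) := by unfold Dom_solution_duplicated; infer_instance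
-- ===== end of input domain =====

-- B replaces A's per-pair substring search on the doubled path by a canonical (lexicographically
-- minimal) rotation computed once per path plus a lookup in a set of canonical forms built once
-- (a different algorithm of comparable cost).

-- ===== PORT A =====
-- contains(small, big): indices reached by the loops are always in range
-- (0 ≤ i ≤ len(big)-len(small), 0 ≤ j < len(small)), so pyGetD with default 0 is exact there.
def containsInner (small big : List Int) (i : Int) : List Int → Bool
  | [] => true                     -- inner for-loop finished without break → for-else: return True
  | j :: js =>
    if PySem.List.pyGetD big (i + j) 0 ≠ PySem.List.pyGetD small j 0 then false   -- break
    else containsInner small big i js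

def containsOuter (small big : List Int) : List Int → Bool
  | [] => false                    -- outer loop exhausted: return False
  | i :: is =>
    if containsInner small big i (PySem.List.pyRange 0 (PySem.List.len small) 1) then true
    else containsOuter small big is

def pyContains (small big : List Int) : Bool :=
  containsOuter small big (PySem.List.pyRange 0 (PySem.List.len big - PySem.List.len small + 1) 1)

-- the 'for path_input in solution_input' loop with its break; len(path)/2 is Python true division,
-- but len(path2) = 2*len(path) is even, so floor division computes the same number.
def innerInput (solution_input : List (List Int)) (path2 : List Int) : Bool :=
  match solution_input with
  | [] => false                    -- no path_input matched → the for-else of the path loop breaks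
  | pi :: rest =>
    if pyContains pi path2 && decide (PySem.List.len pi = PySem.Int.floordiv (PySem.List.len path2) 2)
    then true else innerInput rest path2

-- the 'for path in solution' loop accumulating flag, stopped by the for-else break
def pathsLoop (solution_input : List (List Int)) : List (List Int) → Int → Int
  | [], flag => flag
  | path :: rest, flag =>
    let path2 := path ++ path      -- path = path*2
    if innerInput solution_input path2 then pathsLoop solution_input rest (flag + 1)
    else flag                      -- break out of the path loop

def popLoop (solution_input : List (List Int)) : List (List (List Int)) → Bool
  | [] => false
  | sol :: rest =>
    if pathsLoop solution_input sol 0 = PySem.List.len sol then true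
    else popLoop solution_input rest

def solution_duplicated (population : List (List (List Int))) (solution_input : List (List Int)) : Bool :=
  popLoop solution_input population

-- ===== PORT B =====
-- the generator (p[i:] + p[:i] for i in range(len(p)))
def rotsAlt (p : List Int) : List (List Int) :=
  (PySem.List.pyRange 0 (PySem.List.len p) 1).map
    (fun i => PySem.List.slice p (some i) none ++ PySem.List.slice p none (some i))

-- Python's min on tuples compares lexicographically: PySem.List.min? at the lexicographic
-- order on List Int (pinned to Mathlib's LinearOrder instance so its order lemmas apply)
def lexMin? (xs : List (List Int)) : Option (List Int) :=
  @PySem.List.min? (List Int) (List Int) LinearOrder.toPartialOrder.toLT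
    LinearOrder.toDecidableLT xs (fun x => x)

-- _canon(p): lexicographically minimal rotation ('.getD []' never fires: rotsAlt p ≠ [] when p ≠ [])
def canonAlt (p : List Int) : List Int :=
  if p = [] then [] else (lexMin? (rotsAlt p)).getD []

def solution_duplicated_alt (population : List (List (List Int))) (solution_input : List (List Int)) : Bool :=
  let targets : PySem.Set (List Int) := PySem.Set.ofList (solution_input.map canonAlt)
  population.any fun sol => sol.all fun path => PySem.Set.contains targets (canonAlt path)

-- ===== PRECONDITION & SPEC =====
def Spec_solution_duplicated (population : List (List (List Int))) (solution_input : List (List Int)) (out : Bool) : Prop := out = solution_duplicated_alt population solution_input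
instance (population : List (List (List Int))) (solution_input : List (List Int)) (out : Bool) : Decidable (Spec_solution_duplicated population solution_input out) := by unfold Spec_solution_duplicated; infer_instance

-- ===== CLAIM (what is proved, stated in full; the proofs are below) =====
def Claim_equal_solution_duplicated : Prop := ∀ (population : List (List (List Int))) (solution_input : List (List Int)), Dom_solution_duplicated population solution_input → Spec_solution_duplicated population solution_input (solution_duplicated population solution_input)

-- ===== LEMMAS AND PROOFS =====

theorem containsInner_iff (small big : List Int) (i : Int) (js : List Int) :
    containsInner small big i js = true ↔
      ∀ j ∈ js, PySem.List.pyGetD big (i + j) 0 = PySem.List.pyGetD small j 0 := by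
  induction js with
  | nil => simp [containsInner]
  | cons j js ih =>
    simp only [containsInner]
    split_ifs with h
    · exact iff_of_false (by simp) (fun hall => h (hall j List.mem_cons_self))
    · push_neg at h
      rw [ih]
      constructor
      · intro hall q hq
        rcases List.mem_cons.1 hq with rfl | hq'
        · exact h
        · exact hall q hq'
      · intro hall q hq; exact hall q (List.mem_cons_of_mem _ hq)

theorem containsOuter_iff (small big : List Int) (L : List Int) :
    containsOuter small big L = true ↔
      ∃ i ∈ L, containsInner small big i (PySem.List.pyRange 0 (PySem.List.len small) 1) = true := by
  induction L with
  | nil => simp [containsOuter]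
  | cons i is ih =>
    simp only [containsOuter]
    split_ifs with h
    · exact iff_of_true rfl ⟨i, List.mem_cons_self, h⟩
    · rw [ih]
      constructor
      · rintro ⟨a, ha, hc⟩; exact ⟨a, List.mem_cons_of_mem _ ha, hc⟩
      · rintro ⟨a, ha, hc⟩
        rcases List.mem_cons.1 ha with rfl | ha'
        · exact absurd hc h
        · exact ⟨a, ha', hc⟩

-- for m < |p|, entry m of p.rotate k is entry k+m of p ++ p
theorem rotate_getD (p : List Int) (k m : Nat) (hk : k ≤ p.length) (hm : m < p.length) :
    (p.rotate k).getD m 0 = (p ++ p).getD (k + m) 0 := by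
  have h1 : p.rotate k = ((p ++ p).drop k).take p.length := by
    rw [List.drop_append_of_le_length hk, List.rotate_eq_drop_append_take hk, List.take_append]
    congr 2
    · exact (List.take_of_length_le (by simp)).symm
    · simp; omega
  have hlen2 : k + m < (p ++ p).length := by simp; omega
  rw [h1, List.getD_eq_getElem _ _ (by simp [List.length_take]; omega),
      List.getD_eq_getElem _ _ hlen2, List.getElem_take, List.getElem_drop]

-- pointwise window equality at offset k says exactly: p.rotate k = s
theorem window_iff (p s : List Int) (k : Nat) (hk : k ≤ p.length) (hs : s.length = p.length) :
    (∀ m : Nat, m < p.length → (p ++ p).getD (k + m) 0 = s.getD m 0) ↔ p.rotate k = s := by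
  constructor
  · intro h
    apply List.ext_getElem (by simp [List.length_rotate, hs])
    intro m hm1 hm2
    have hmp : m < p.length := by simpa [List.length_rotate] using hm1
    have := (rotate_getD p k m hk hmp).trans (h m hmp)
    rwa [List.getD_eq_getElem _ _ hm1, List.getD_eq_getElem _ _ hm2] at this
  · intro h m hm
    rw [← h]
    exact (rotate_getD p k m hk hm).symm

-- contains(s, p*2) finds exactly the rotations of p (when lengths agree)
theorem contains_rotate (p s : List Int) (hsl : s.length = p.length) :
    pyContains s (p ++ p) = true ↔ ∃ k ≤ p.length, p.rotate k = s := by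
  unfold pyContains
  rw [containsOuter_iff]
  have hb : PySem.List.len (p ++ p) - PySem.List.len s + 1 = ((p.length + 1 : Nat) : Int) := by
    simp only [PySem.List.len_eq, List.length_append, hsl]; push_cast; ring
  rw [hb]
  constructor
  · rintro ⟨i, hi, hinner⟩
    rw [PySem.List.mem_pyRange_one] at hi
    obtain ⟨hi0, hilt⟩ := hi
    refine ⟨i.toNat, by omega, ?_⟩
    rw [← window_iff p s i.toNat (by omega) hsl]
    intro m hm
    rw [containsInner_iff] at hinner
    have hmem : (m : Int) ∈ PySem.List.pyRange 0 (PySem.List.len s) 1 := by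
      rw [PySem.List.mem_pyRange_one, PySem.List.len_eq]
      constructor
      · exact Int.natCast_nonneg m
      · exact_mod_cast (hsl ▸ hm)
    have := hinner (m : Int) hmem
    rw [show i + (m : Int) = ((i.toNat + m : Nat) : Int) by omega] at this
    rw [PySem.List.pyGetD_natCast, PySem.List.pyGetD_natCast] at this
    exact this
  · rintro ⟨k, hk, hrot⟩
    refine ⟨(k : Int), ?_, ?_⟩
    · rw [PySem.List.mem_pyRange_one]
      constructor
      · exact Int.natCast_nonneg k
      · exact_mod_cast Nat.lt_succ_of_le hk
    · rw [containsInner_iff]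
      intro j hj
      rw [PySem.List.mem_pyRange_one, PySem.List.len_eq] at hj
      obtain ⟨hj0, hjlt⟩ := hj
      have hjm : j = ((j.toNat : Nat) : Int) := by omega
      have hmlt : j.toNat < p.length := by omega
      rw [hjm, show (k : Int) + ((j.toNat : Nat) : Int) = ((k + j.toNat : Nat) : Int) by push_cast; ring,
          PySem.List.pyGetD_natCast, PySem.List.pyGetD_natCast]
      exact ((window_iff p s k hk hsl).2 hrot) j.toNat hmlt

-- A's per-pair test is exactly rotation equivalence
theorem matched_iff (s p : List Int) :
    (pyContains s (p ++ p) &&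
      decide (PySem.List.len s = PySem.Int.floordiv (PySem.List.len (p ++ p)) 2)) = true ↔
    s ~r p := by
  rw [Bool.and_eq_true, decide_eq_true_iff]
  have hlen : (PySem.List.len s = PySem.Int.floordiv (PySem.List.len (p ++ p)) 2) ↔
      s.length = p.length := by
    rw [PySem.List.len_eq, PySem.List.len_eq, List.length_append,
        show ((2 : Int)) = ((2 : Nat) : Int) from rfl, PySem.Int.floordiv_natCast]
    rw [show (p.length + p.length) / 2 = p.length by omega]
    exact Nat.cast_inj
  constructor
  · rintro ⟨hc, hl⟩
    have hsl : s.length = p.length := hlen.1 hl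
    rcases (contains_rotate p s hsl).1 hc with ⟨k, hk, hrot⟩
    exact (List.isRotated_iff_mod.2 ⟨k, hk, hrot⟩).symm
  · intro h
    have hsl : s.length = p.length := (h.perm.length_eq)
    rcases List.isRotated_iff_mod.1 h.symm with ⟨k, hk, hrot⟩
    exact ⟨(contains_rotate p s hsl).2 ⟨k, hk, hrot⟩, hlen.2 hsl⟩

theorem innerInput_iff (inp : List (List Int)) (path2 : List Int) :
    innerInput inp path2 = true ↔
      ∃ pi ∈ inp, (pyContains pi path2 &&
        decide (PySem.List.len pi = PySem.Int.floordiv (PySem.List.len path2) 2)) = true := by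
  induction inp with
  | nil => simp [innerInput]
  | cons pi rest ih =>
    simp only [innerInput]
    split_ifs with h
    · exact iff_of_true rfl ⟨pi, List.mem_cons_self, h⟩
    · rw [ih]
      constructor
      · rintro ⟨a, ha, hc⟩; exact ⟨a, List.mem_cons_of_mem _ ha, hc⟩
      · rintro ⟨a, ha, hc⟩
        rcases List.mem_cons.1 ha with rfl | ha'
        · exact absurd hc h
        · exact ⟨a, ha', hc⟩

theorem pathsLoop_iff (inp : List (List Int)) (l : List (List Int)) (f : Int) :
    pathsLoop inp l f = f + (l.length : Int) ↔ ∀ path ∈ l, innerInput inp (path ++ path) = true := by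
  induction l generalizing f with
  | nil => simp [pathsLoop]
  | cons path rest ih =>
    simp only [pathsLoop, List.length_cons]
    split_ifs with h
    · rw [show f + ((rest.length + 1 : Nat) : Int) = (f + 1) + (rest.length : Int) by push_cast; ring,
          ih (f + 1)]
      constructor
      · intro hall q hq
        rcases List.mem_cons.1 hq with rfl | hq'
        · exact h
        · exact hall q hq'
      · intro hall q hq; exact hall q (List.mem_cons_of_mem _ hq)
    · constructor
      · intro hf
        exfalso
        omega
      · intro hall; exact absurd (hall path List.mem_cons_self) h

theorem pathsLoop_iff0 (inp : List (List Int)) (l : List (List Int)) :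
    pathsLoop inp l 0 = PySem.List.len l ↔ ∀ path ∈ l, innerInput inp (path ++ path) = true := by
  rw [PySem.List.len_eq, show ((l.length : Nat) : Int) = 0 + (l.length : Int) from (zero_add _).symm]
  exact pathsLoop_iff inp l 0

theorem popLoop_iff (inp : List (List Int)) (pop : List (List (List Int))) :
    popLoop inp pop = true ↔
      ∃ sol ∈ pop, ∀ path ∈ sol, innerInput inp (path ++ path) = true := by
  induction pop with
  | nil => simp [popLoop]
  | cons sol rest ih =>
    simp only [popLoop]
    split_ifs with h
    · exact iff_of_true rfl ⟨sol, List.mem_cons_self, (pathsLoop_iff0 inp sol).1 h⟩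
    · rw [ih]
      constructor
      · rintro ⟨s, hs, hall⟩; exact ⟨s, List.mem_cons_of_mem _ hs, hall⟩
      · rintro ⟨s, hs, hall⟩
        rcases List.mem_cons.1 hs with rfl | hs'
        · exact absurd ((pathsLoop_iff0 inp s).2 hall) h
        · exact ⟨s, hs', hall⟩

-- rotsAlt p lists exactly the rotations p.rotate k, k < |p|
theorem rotsAlt_eq (p : List Int) :
    rotsAlt p = (List.range p.length).map (fun k => p.rotate k) := by
  unfold rotsAlt
  rw [PySem.List.len_eq, PySem.List.pyRange_one, List.map_map]
  simp only [Int.sub_zero, Int.toNat_natCast]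
  apply List.map_congr_left
  intro k hk
  simp only [Function.comp_apply, zero_add]
  rw [PySem.List.slice_from_natCast, PySem.List.slice_to_natCast,
      List.rotate_eq_drop_append_take (le_of_lt (List.mem_range.1 hk))]

theorem mem_rotsAlt (p s : List Int) (hp : p ≠ []) : s ∈ rotsAlt p ↔ p ~r s := by
  rw [rotsAlt_eq]
  simp only [List.mem_map, List.mem_range]
  constructor
  · rintro ⟨k, hk, rfl⟩; exact ⟨k, rfl⟩
  · intro h
    rcases List.isRotated_iff_mod.1 h with ⟨k, hk, rfl⟩
    rcases Nat.lt_or_ge k p.length with hlt | hge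
    · exact ⟨k, hlt, rfl⟩
    · have : k = p.length := le_antisymm hk hge
      subst this
      exact ⟨0, List.length_pos_of_ne_nil hp, by rw [List.rotate_length, List.rotate_zero]⟩

theorem rotsAlt_ne_nil (p : List Int) (hp : p ≠ []) : rotsAlt p ≠ [] := by
  rw [rotsAlt_eq]
  simp [hp]

theorem lexMin?_eq_none_iff {xs : List (List Int)} : lexMin? xs = none ↔ xs = [] :=
  @PySem.List.min?_eq_none_iff (List Int) (List Int) LinearOrder.toPartialOrder.toLT
    LinearOrder.toDecidableLT xs (fun x => x)

theorem lexMin?_mem {xs : List (List Int)} {m : List Int} (h : lexMin? xs = some m) : m ∈ xs :=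
  @PySem.List.min?_mem (List Int) (List Int) LinearOrder.toPartialOrder.toLT
    LinearOrder.toDecidableLT xs (fun x => x) m h

theorem lexMin?_isMin {xs : List (List Int)} {m : List Int} (h : lexMin? xs = some m) :
    ∀ y ∈ xs, m ≤ y := by
  intro y hy
  simpa using PySem.List.min?_isMin h y hy

theorem canonAlt_isRotated (p : List Int) : p ~r canonAlt p := by
  unfold canonAlt
  split_ifs with h
  · subst h; exact List.IsRotated.refl []
  · cases hmin : lexMin? (rotsAlt p) with
    | none => exact absurd (lexMin?_eq_none_iff.1 hmin) (rotsAlt_ne_nil p h)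
    | some m =>
      have := lexMin?_mem hmin
      simpa using (mem_rotsAlt p m h).1 this

theorem canonAlt_eq_iff (a b : List Int) : canonAlt a = canonAlt b ↔ a ~r b := by
  constructor
  · intro h
    exact (canonAlt_isRotated a).trans (h ▸ (canonAlt_isRotated b).symm)
  · intro h
    by_cases ha : a = []
    · subst ha
      have hb : b = [] := by
        have := h.perm.length_eq
        simpa [eq_comm, List.length_eq_zero_iff] using this
      subst hb; rfl
    · have hb : b ≠ [] := by
        intro hb; subst hb
        have := h.perm.length_eq
        simp [List.length_eq_zero_iff] at this
        exact ha this
      unfold canonAlt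
      rw [if_neg ha, if_neg hb]
      cases hma : lexMin? (rotsAlt a) with
      | none => exact absurd (lexMin?_eq_none_iff.1 hma) (rotsAlt_ne_nil a ha)
      | some ma =>
        cases hmb : lexMin? (rotsAlt b) with
        | none => exact absurd (lexMin?_eq_none_iff.1 hmb) (rotsAlt_ne_nil b hb)
        | some mb =>
          have hma_mem : ma ∈ rotsAlt a := lexMin?_mem hma
          have hmb_mem : mb ∈ rotsAlt b := lexMin?_mem hmb
          have hma_b : ma ∈ rotsAlt b :=
            (mem_rotsAlt b ma hb).2 (h.symm.trans ((mem_rotsAlt a ma ha).1 hma_mem))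
          have hmb_a : mb ∈ rotsAlt a :=
            (mem_rotsAlt a mb ha).2 (h.trans ((mem_rotsAlt b mb hb).1 hmb_mem))
          have h1 : ma ≤ mb := lexMin?_isMin hma mb hmb_a
          have h2 : mb ≤ ma := lexMin?_isMin hmb ma hma_b
          simp [le_antisymm h1 h2]

theorem alt_iff (pop : List (List (List Int))) (inp : List (List Int)) :
    solution_duplicated_alt pop inp = true ↔
      ∃ sol ∈ pop, ∀ path ∈ sol, ∃ pi ∈ inp, path ~r pi := by
  unfold solution_duplicated_alt
  simp only [List.any_eq_true, List.all_eq_true]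
  constructor
  · rintro ⟨sol, hsol, hall⟩
    refine ⟨sol, hsol, fun path hpath => ?_⟩
    have := hall path hpath
    rw [PySem.Set.contains_iff, PySem.Set.mem_ofList, List.mem_map] at this
    rcases this with ⟨pi, hpi, heq⟩
    exact ⟨pi, hpi, (canonAlt_eq_iff path pi).1 heq.symm⟩
  · rintro ⟨sol, hsol, hall⟩
    refine ⟨sol, hsol, fun path hpath => ?_⟩
    rcases hall path hpath with ⟨pi, hpi, hrot⟩
    rw [PySem.Set.contains_iff, PySem.Set.mem_ofList, List.mem_map]
    exact ⟨pi, hpi, ((canonAlt_eq_iff path pi).2 hrot).symm⟩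

-- ===== VERDICT (by name: the statement is the Claim_ definition above) =====
theorem solution_duplicated_spec : Claim_equal_solution_duplicated := by
  intro pop inp _
  unfold Spec_solution_duplicated solution_duplicated
  rw [Bool.eq_iff_iff, popLoop_iff, alt_iff]
  constructor
  · rintro ⟨sol, hsol, hall⟩
    refine ⟨sol, hsol, fun path hpath => ?_⟩
    rcases (innerInput_iff inp (path ++ path)).1 (hall path hpath) with ⟨pi, hpi, hok⟩
    exact ⟨pi, hpi, ((matched_iff pi path).1 hok).symm⟩
  · rintro ⟨sol, hsol, hall⟩
    refine ⟨sol, hsol, fun path hpath => ?_⟩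
    rcases hall path hpath with ⟨pi, hpi, hrot⟩
    exact (innerInput_iff inp (path ++ path)).2 ⟨pi, hpi, (matched_iff pi path).2 hrot.symm⟩
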